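-- pv_equiv track=rewrite | github.com/paulklemstine/factor | lean/demo/New/PythagoreanDensity/density_analysis_demo.py | count_s2s
-- ===== SOURCE A (Python) =====
-- import math
--
-- def count_s2s(N: int) -> int:
--     """Count integers ≤ N that are sums of two squares."""
--     s2s = set()
--     for a in range(int(math.isqrt(N)) + 1):
--         for b in range(a, int(math.isqrt(N - a*a)) + 1):
--             val = a*a + b*b
--             if val <= N:
--                 s2s.add(val)
--     return len(s2s)
-- ===== SOURCE B (Python) =====
-- import math
--
-- def count_s2s(N: int) -> int:
--     """Count integers <= N that are sums of two squares, by Fermat's theorem: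
--     n is a sum of two squares iff every prime p = 3 (mod 4) divides n to an
--     even power.  Sieve composites, then mark the n with an odd power of such a p."""
--     comp = bytearray(N + 1)                  # comp[j] == 1  iff  j is composite
--     for i in range(2, math.isqrt(N) + 1):
--         if not comp[i]:
--             for j in range(i * i, N + 1, i):
--                 comp[j] = 1
--     bad = bytearray(N + 1)                   # bad[n] == 1 iff some prime p = 3 (mod 4) divides n oddly
--     for p in range(3, N + 1, 4):
--         if not comp[p]:
--             for m in range(p, N + 1, p):
--                 v = m
--                 e = 0
--                 while v % p == 0:
--                     v //= p
--                     e += 1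
--                 if e % 2 == 1:
--                     bad[m] = 1
--     count = 0
--     for n in range(N + 1):
--         if not bad[n]:
--             count += 1
--     return count
-- ===== Notes on version B (the rewrite author's own statement) =====
-- stated objective: alternative
-- what changed: A enumerates all pairs (a,b) and counts the distinct values a*a+b*b via a set; B never generates pairs: it sieves composites, then uses Fermat's two-squares criterion, marking exactly the n in which some prime p = 3 (mod 4) appears with an odd exponent, and counts the unmarked n with a plain counter.
import Mathlib
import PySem

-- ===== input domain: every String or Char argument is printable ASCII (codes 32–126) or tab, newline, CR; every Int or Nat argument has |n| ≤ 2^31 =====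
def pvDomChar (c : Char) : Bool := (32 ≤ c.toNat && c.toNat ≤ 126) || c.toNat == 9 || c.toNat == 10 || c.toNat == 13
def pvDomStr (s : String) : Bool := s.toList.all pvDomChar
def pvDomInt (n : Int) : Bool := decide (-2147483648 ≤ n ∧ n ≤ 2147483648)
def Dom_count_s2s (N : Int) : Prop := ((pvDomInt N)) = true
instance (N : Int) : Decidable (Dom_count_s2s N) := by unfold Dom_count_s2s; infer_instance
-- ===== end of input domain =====

-- B never enumerates pairs (a,b): it sieves composites and applies Fermat's two-squares
-- criterion — it marks the n in which some prime p ≡ 3 (mod 4) appears with an odd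
-- exponent and counts the unmarked n with a plain counter (objective: alternative).

-- math.isqrt(n) for n ≥ 0 (exact there; n < 0 raises ValueError in Python and is excluded by
-- Pre_; every call site in the ports has a nonnegative argument under Pre_).
def pyIsqrt (n : Int) : Int := (Nat.sqrt n.toNat : Int)

-- ===== PORT A =====
-- the doubly-nested accumulation loop of A building the set s2s.
-- Python's hash set is modelled by Std.TreeSet: the code only ever INSERTS into s2s and takes
-- len(s2s) at the end (it never iterates the set), and for insert/len any exact finite-set
-- model agrees with Python; a tree set keeps the port evaluable at large N.
def s2sLoop (N : Int) : Std.TreeSet Int :=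
  (PySem.List.pyRange 0 (pyIsqrt N + 1) 1).foldl (fun s a =>
    (PySem.List.pyRange a (pyIsqrt (N - a * a) + 1) 1).foldl (fun s b =>
      let val := a * a + b * b
      if val ≤ N then s.insert val else s) s) ∅

def count_s2s (N : Int) : Int :=
  let s2s : Std.TreeSet Int := s2sLoop N
  (s2s.size : Int)

-- ===== PORT B =====
-- bytearray(N+1) is Array Int of zeros; comp[j] = 1 (index provably in range) is
-- Array.setIfInBounds, exact there; comp = sieve of Eratosthenes marking composites
def sieveComp (N : Int) : Array Int :=
  (PySem.List.pyRange 2 (pyIsqrt N + 1) 1).foldl (fun comp i =>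
    if comp.getD i.toNat 0 = 0 then
      (PySem.List.pyRange (i * i) (N + 1) i).foldl (fun c j => c.setIfInBounds j.toNat 1) comp
    else comp) (Array.replicate (N + 1).toNat 0)

-- the while-loop 'while v % p == 0: v //= p; e += 1' of Source B, returning the final e;
-- the 2 ≤ p ∧ 0 < v guard only makes the recursion total (at every call site p is a
-- sieve-certified prime ≥ 3 and v ≥ p, so the guard never alters behaviour)
def valLoopE (p v e : Int) : Int :=
  if h : 2 ≤ p ∧ 0 < v ∧ PySem.Int.mod v p = 0 then
    valLoopE p (PySem.Int.floordiv v p) (e + 1)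
  else e
termination_by v.toNat
decreasing_by
  rcases h with ⟨hp, hv, hm⟩
  rw [PySem.Int.floordiv_eq_ediv_of_pos (by omega)]
  have hd : p ∣ v := (PySem.Int.mod_eq_zero_iff_dvd v p).mp hm
  have h1 : 0 ≤ v / p := Int.ediv_nonneg (by omega) (by omega)
  have h3 : v / p * p = v := Int.ediv_mul_cancel hd
  have h2 : v / p < v := by nlinarith
  omega

-- the marking loop of Source B: for every sieve-prime p ≡ 3 (mod 4), mark the multiples m of p
-- in which p appears with an odd exponent
def badArr (N : Int) : Array Int :=
  let comp := sieveComp N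
  (PySem.List.pyRange 3 (N + 1) 4).foldl (fun bad p =>
    if comp.getD p.toNat 0 = 0 then
      (PySem.List.pyRange p (N + 1) p).foldl (fun b m =>
        if PySem.Int.mod (valLoopE p m 0) 2 = 1 then b.setIfInBounds m.toNat 1 else b) bad
    else bad) (Array.replicate (N + 1).toNat 0)

-- the final counting loop of Source B
def count_s2s_alt (N : Int) : Int :=
  let bad := badArr N
  (PySem.List.pyRange 0 (N + 1) 1).foldl (fun count n =>
    if bad.getD n.toNat 0 = 0 then count + 1 else count) 0

-- ===== PRECONDITION & SPEC =====
-- A raises ValueError (math.isqrt of a negative) exactly when N < 0.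
def Pre_count_s2s (N : Int) : Prop := 0 ≤ N
instance (N : Int) : Decidable (Pre_count_s2s N) := by unfold Pre_count_s2s; infer_instance
def pvWitness_count_s2s : Int := (5)

def Spec_count_s2s (N : Int) (out : Int) : Prop := out = count_s2s_alt N
instance (N : Int) (out : Int) : Decidable (Spec_count_s2s N out) := by unfold Spec_count_s2s; infer_instance

-- ===== CLAIM (what is proved, stated in full; the proofs are below) =====
def Claim_equal_count_s2s : Prop := ∀ (N : Int), Dom_count_s2s N → Pre_count_s2s N → Spec_count_s2s N (count_s2s N)

-- ===== LEMMAS AND PROOFS =====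

-- spec of pyIsqrt on nonnegative input
theorem pyIsqrt_nonneg (n : Int) : 0 ≤ pyIsqrt n := by
  unfold pyIsqrt; exact Int.natCast_nonneg _

theorem pyIsqrt_sq_le (n : Int) (hn : 0 ≤ n) : pyIsqrt n * pyIsqrt n ≤ n := by
  unfold pyIsqrt
  have h := Nat.sqrt_le n.toNat
  have : ((Nat.sqrt n.toNat * Nat.sqrt n.toNat : Nat) : Int) ≤ (n.toNat : Int) := Int.ofNat_le.mpr h
  push_cast at this
  omega

theorem lt_pyIsqrt_succ_sq (n : Int) (hn : 0 ≤ n) : n < (pyIsqrt n + 1) * (pyIsqrt n + 1) := by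
  unfold pyIsqrt
  have h := Nat.lt_succ_sqrt n.toNat
  have : ((n.toNat : Nat) : Int) < ((Nat.succ (Nat.sqrt n.toNat) * Nat.succ (Nat.sqrt n.toNat) : Nat) : Int) := Int.ofNat_lt.mpr h
  push_cast at this
  omega

theorem le_pyIsqrt (a n : Int) (ha : 0 ≤ a) (hn : 0 ≤ n) (h : a * a ≤ n) : a ≤ pyIsqrt n := by
  by_contra hlt
  push Not at hlt
  have h1 : pyIsqrt n + 1 ≤ a := by omega
  have := lt_pyIsqrt_succ_sq n hn
  have h0 := pyIsqrt_nonneg n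
  nlinarith

-- the representation predicate
def RepS2S (n : Int) : Prop := ∃ a b : Int, 0 ≤ a ∧ a ≤ b ∧ a * a + b * b = n

-- ----- A-side: membership in the accumulated set -----

theorem mem_foldl_step {γ : Type} (l : List γ) (f : Std.TreeSet Int → γ → Std.TreeSet Int)
    (Q : γ → Int → Prop)
    (hf : ∀ s a x, x ∈ f s a ↔ x ∈ s ∨ Q a x) (s0 : Std.TreeSet Int) (x : Int) :
    x ∈ l.foldl f s0 ↔ x ∈ s0 ∨ ∃ a ∈ l, Q a x := by
  induction l generalizing s0 with
  | nil => simp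
  | cons a t ih =>
    simp only [List.foldl_cons, ih, hf, List.mem_cons]
    constructor
    · rintro (( h | h) | ⟨c, hc, hq⟩)
      · exact Or.inl h
      · exact Or.inr ⟨a, Or.inl rfl, h⟩
      · exact Or.inr ⟨c, Or.inr hc, hq⟩
    · rintro (h | ⟨c, (rfl | hc), hq⟩)
      · exact Or.inl (Or.inl h)
      · exact Or.inl (Or.inr hq)
      · exact Or.inr ⟨c, hc, hq⟩

theorem mem_inner_step (N : Int) (s : Std.TreeSet Int) (x val : Int) :
    (x ∈ if val ≤ N then s.insert val else s) ↔ x ∈ s ∨ (val ≤ N ∧ x = val) := by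
  split_ifs with h
  · rw [Std.TreeSet.mem_insert, compare_eq_iff_eq]
    constructor
    · rintro (rfl | hs)
      · exact Or.inr ⟨h, rfl⟩
      · exact Or.inl hs
    · rintro (hs | ⟨_, rfl⟩)
      · exact Or.inr hs
      · exact Or.inl rfl
  · tauto

theorem mem_A_set (N : Int) (hN : 0 ≤ N) (x : Int) :
    x ∈ s2sLoop N ↔ (0 ≤ x ∧ x ≤ N ∧ RepS2S x) := by
  unfold s2sLoop
  rw [mem_foldl_step _ _
      (fun a x => ∃ b ∈ PySem.List.pyRange a (pyIsqrt (N - a * a) + 1) 1,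
        a * a + b * b ≤ N ∧ x = a * a + b * b)
      (fun s a x => by
        exact mem_foldl_step _ _ (fun b x => a * a + b * b ≤ N ∧ x = a * a + b * b)
          (fun s b x => mem_inner_step N s x (a * a + b * b)) s x)]
  simp only [Std.TreeSet.not_mem_emptyc, false_or]
  constructor
  · rintro ⟨a, hamem, b, hbmem, hvle, rfl⟩
    rw [PySem.List.mem_pyRange_one] at hamem hbmem
    exact ⟨by nlinarith [hamem.1, hbmem.1], hvle, a, b, hamem.1, hbmem.1, rfl⟩
  · rintro ⟨hx0, hxN, a, b, ha0, hab, rfl⟩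
    have hb0 : 0 ≤ b := by omega
    refine ⟨a, ?_, b, ?_, le_of_eq rfl |>.trans hxN, rfl⟩
    · rw [PySem.List.mem_pyRange_one]
      exact ⟨ha0, by have := le_pyIsqrt a N ha0 hN (by nlinarith); omega⟩
    · rw [PySem.List.mem_pyRange_one]
      refine ⟨hab, ?_⟩
      have hr0 : 0 ≤ N - a * a := by nlinarith
      have := le_pyIsqrt b (N - a * a) hb0 hr0 (by omega)
      omega

theorem nodup_A_set (N : Int) : (s2sLoop N).toList.Nodup := by
  have h := Std.TreeSet.ordered_toList (t := s2sLoop N)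
  exact h.imp (fun hlt => ne_of_lt (compare_lt_iff_lt.mp hlt))

-- ----- generic array-marking fold -----

theorem getD_setIfInBounds (a : Array Int) (i k : Nat) (v d : Int) :
    (a.setIfInBounds i v).getD k d = if i = k ∧ k < a.size then v else a.getD k d := by
  rw [Array.getD_eq_getD_getElem?, Array.getD_eq_getD_getElem?, Array.getElem?_setIfInBounds]
  split_ifs with h1 h2 h3 <;> simp_all

theorem size_foldl_mark {γ : Type} (l : List γ) (F : Array Int → γ → Array Int)
    (hsz : ∀ arr x, (F arr x).size = arr.size) (arr : Array Int) :
    (l.foldl F arr).size = arr.size := by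
  induction l generalizing arr with
  | nil => rfl
  | cons a t ih => rw [List.foldl_cons, ih, hsz]

theorem getD_foldl_mark {γ : Type} (l : List γ) (F : Array Int → γ → Array Int)
    (Q : γ → Nat → Prop)
    (hsz : ∀ arr x, (F arr x).size = arr.size)
    (hF1 : ∀ arr x k d, Q x k ∧ k < arr.size → (F arr x).getD k d = 1)
    (hF2 : ∀ arr x k d, ¬ (Q x k ∧ k < arr.size) → (F arr x).getD k d = arr.getD k d)
    (arr : Array Int) (k : Nat) (d : Int) :
    ((∃ x ∈ l, Q x k) ∧ k < arr.size → (l.foldl F arr).getD k d = 1) ∧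
      (¬ ((∃ x ∈ l, Q x k) ∧ k < arr.size) → (l.foldl F arr).getD k d = arr.getD k d) := by
  induction l generalizing arr with
  | nil => simp
  | cons a t ih =>
    rw [List.foldl_cons]
    have hsz' : (F arr a).size = arr.size := hsz arr a
    obtain ⟨ih1, ih2⟩ := ih (F arr a)
    rw [hsz'] at ih1 ih2
    constructor
    · rintro ⟨⟨x, hx, hq⟩, hk⟩
      rcases List.mem_cons.mp hx with rfl | hx
      · by_cases ht : ∃ x ∈ t, Q x k
        · exact ih1 ⟨ht, hk⟩
        · rw [ih2 (fun h => ht h.1)]; exact hF1 arr x k d ⟨hq, hk⟩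
      · exact ih1 ⟨⟨x, hx, hq⟩, hk⟩
    · intro hno
      have hk_or : ¬ (∃ x ∈ t, Q x k) ∨ ¬ k < arr.size := by
        by_cases hk : k < arr.size
        · left; intro ⟨x, hx, hq⟩; exact hno ⟨⟨x, List.mem_cons_of_mem a hx, hq⟩, hk⟩
        · right; exact hk
      have hQa : ¬ (Q a k ∧ k < arr.size) := by
        rintro ⟨hq, hk⟩; exact hno ⟨⟨a, List.mem_cons_self .., hq⟩, hk⟩
      rcases hk_or with ht | hk
      · rw [ih2 (fun h => ht h.1), hF2 arr a k d hQa]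
      · rw [ih2 (fun h => hk h.2), hF2 arr a k d hQa]

-- ----- sieve correctness -----

-- 'already marked at stage i': some prime p < i with p ∣ j and p*p ≤ j
def SMarked (i : Int) (j : Nat) : Prop := ∃ p : Nat, p.Prime ∧ (p : Int) < i ∧ p ∣ j ∧ p * p ≤ j

def SInv (N i : Int) (comp : Array Int) : Prop :=
  comp.size = (N + 1).toNat ∧
    ∀ j : Nat, j ≤ N.toNat →
      (SMarked i j → comp.getD j 0 = 1) ∧ (¬ SMarked i j → comp.getD j 0 = 0)

theorem getD_replicate (n k : Nat) (d : Int) : (Array.replicate n (0 : Int)).getD k d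
    = if k < n then 0 else d := by
  rw [Array.getD_eq_getD_getElem?, Array.getElem?_replicate]
  split_ifs <;> rfl

-- one outer step of the sieve
theorem sieve_step (N i : Int) (hN : 0 ≤ N) (h2 : 2 ≤ i) (hii : i * i ≤ N) (comp : Array Int)
    (h : SInv N i comp) :
    SInv N (i + 1)
      (if comp.getD i.toNat 0 = 0 then
        (PySem.List.pyRange (i * i) (N + 1) i).foldl (fun c j => c.setIfInBounds j.toNat 1) comp
      else comp) := by
  obtain ⟨hsize, hchar⟩ := h
  have hiN : i ≤ N := by nlinarith
  have hitn : (i.toNat : Int) = i := Int.toNat_of_nonneg (by omega)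
  have hitle : i.toNat ≤ N.toNat := by omega
  have hmark_succ : ∀ j : Nat, SMarked (i + 1) j ↔
      SMarked i j ∨ (i.toNat.Prime ∧ i.toNat ∣ j ∧ i.toNat * i.toNat ≤ j) := by
    intro j
    constructor
    · rintro ⟨p, hp, hlt, hdvd, hsq⟩
      by_cases hpi : (p : Int) = i
      · right
        have : p = i.toNat := by omega
        subst this
        exact ⟨hp, hdvd, hsq⟩
      · exact Or.inl ⟨p, hp, by omega, hdvd, hsq⟩
    · rintro (⟨p, hp, hlt, hdvd, hsq⟩ | ⟨hpr, hdvd, hsq⟩)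
      · exact ⟨p, hp, by omega, hdvd, hsq⟩
      · exact ⟨i.toNat, hpr, by omega, hdvd, hsq⟩
  by_cases hpr : i.toNat.Prime
  · -- i is prime: guard holds (i was never marked), multiples get marked
    have hnm : ¬ SMarked i i.toNat := by
      rintro ⟨p, hp, hlt, hdvd, hsq⟩
      rcases (Nat.Prime.eq_one_or_self_of_dvd hpr p hdvd) with rfl | rfl
      · exact hp.one_lt.ne' rfl
      · omega
    rw [if_pos ((hchar i.toNat hitle).2 hnm)]
    have hmark := getD_foldl_mark (PySem.List.pyRange (i * i) (N + 1) i)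
      (fun c j => c.setIfInBounds j.toNat 1) (fun x k => x.toNat = k)
      (fun c j => Array.size_setIfInBounds)
      (fun c x k d hk => by rw [getD_setIfInBounds, if_pos ⟨hk.1, hk.2⟩])
      (fun c x k d hk => by rw [getD_setIfInBounds, if_neg hk])
      comp
    constructor
    · rw [size_foldl_mark _ _ (fun c j => Array.size_setIfInBounds), hsize]
    · intro j hjN
      have hjlt : j < comp.size := by omega
      have hex : (∃ x ∈ PySem.List.pyRange (i * i) (N + 1) i, x.toNat = j) ↔
          (i.toNat ∣ j ∧ i.toNat * i.toNat ≤ j) := by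
        constructor
        · rintro ⟨x, hx, rfl⟩
          rw [PySem.List.mem_pyRange_iff_of_pos (by omega)] at hx
          obtain ⟨hx1, hx2, hx3⟩ := hx
          have hx0 : 0 ≤ x := le_trans (by nlinarith) hx1
          have hdvd : i ∣ x := by
            have : x = (x - i * i) + i * i := by ring
            rw [this]
            exact dvd_add hx3 ⟨i, rfl⟩
          have hxc : (x.toNat : Int) = x := Int.toNat_of_nonneg hx0
          constructor
          · rw [← Int.natCast_dvd_natCast, hitn, hxc]
            exact hdvd
          · have : ((i.toNat * i.toNat : Nat) : Int) ≤ ((x.toNat : Nat) : Int) := by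
              push_cast
              rw [hitn, hxc]
              exact hx1
            exact_mod_cast this
        · rintro ⟨hdvd, hsq⟩
          refine ⟨(j : Int), ?_, Int.toNat_natCast j⟩
          rw [PySem.List.mem_pyRange_iff_of_pos (by omega)]
          refine ⟨?_, by omega, ?_⟩
          · have : ((i.toNat * i.toNat : Nat) : Int) ≤ ((j : Nat) : Int) := by exact_mod_cast hsq
            push_cast at this
            rw [hitn] at this
            exact this
          · have hdj : i ∣ (j : Int) := by
              rw [← hitn, Int.natCast_dvd_natCast]
              exact hdvd
            exact dvd_sub hdj ⟨i, rfl⟩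
      constructor
      · intro hm
        rcases (hmark_succ j).mp hm with hm | ⟨_, hdvd, hsq⟩
        · by_cases hex2 : ∃ x ∈ PySem.List.pyRange (i * i) (N + 1) i, x.toNat = j
          · exact (hmark j 0).1 ⟨hex2, hjlt⟩
          · rw [(hmark j 0).2 (fun hh => hex2 hh.1)]
            exact (hchar j hjN).1 hm
        · exact (hmark j 0).1 ⟨hex.mpr ⟨hdvd, hsq⟩, hjlt⟩
      · intro hm
        have hnex : ¬ ∃ x ∈ PySem.List.pyRange (i * i) (N + 1) i, x.toNat = j := by
          intro hh
          exact hm ((hmark_succ j).mpr (Or.inr ⟨hpr, hex.mp hh⟩))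
        rw [(hmark j 0).2 (fun hh => hnex hh.1)]
        exact (hchar j hjN).2 (fun hh => hm ((hmark_succ j).mpr (Or.inl hh)))
  · -- i composite: it was marked already, guard fails, nothing changes
    have hm : SMarked i i.toNat := by
      have h1 : i.toNat ≠ 1 := by omega
      have hq := Nat.minFac_prime h1
      have hqd := Nat.minFac_dvd i.toNat
      have hqsq : i.toNat.minFac ^ 2 ≤ i.toNat := Nat.minFac_sq_le_self (by omega) hpr
      have hqlt : i.toNat.minFac < i.toNat := by
        rcases Nat.lt_or_ge i.toNat.minFac i.toNat with h | h
        · exact h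
        · exfalso
          have : i.toNat.minFac = i.toNat := le_antisymm (Nat.le_of_dvd (by omega) hqd) h
          rw [this] at hq
          exact hpr hq
      exact ⟨i.toNat.minFac, hq, by omega, hqd, by nlinarith [sq_nonneg i.toNat.minFac, hqsq]⟩
    rw [if_neg (by rw [(hchar i.toNat hitle).1 hm]; omega)]
    refine ⟨hsize, fun j hjN => ⟨?_, ?_⟩⟩
    · intro hmj
      rcases (hmark_succ j).mp hmj with hmj | ⟨hpr2, _, _⟩
      · exact (hchar j hjN).1 hmj
      · exact absurd hpr2 hpr
    · intro hmj
      exact (hchar j hjN).2 (fun hh => hmj ((hmark_succ j).mpr (Or.inl hh)))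

-- the outer sieve loop preserves & completes the invariant
theorem sieve_loop (N : Int) (hN : 0 ≤ N) :
    ∀ (n : Nat) (i : Int), (pyIsqrt N + 1 - i).toNat = n → 2 ≤ i →
      ∀ comp, SInv N i comp →
      SInv N (max i (pyIsqrt N + 1))
        ((PySem.List.pyRange i (pyIsqrt N + 1) 1).foldl (fun comp i =>
          if comp.getD i.toNat 0 = 0 then
            (PySem.List.pyRange (i * i) (N + 1) i).foldl (fun c j => c.setIfInBounds j.toNat 1) comp
          else comp) comp) := by
  intro n
  induction n using Nat.strong_induction_on with
  | _ n ih =>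
    intro i hn h2 comp hinv
    by_cases hib : i < pyIsqrt N + 1
    · rw [PySem.List.pyRange_one_cons hib, List.foldl_cons]
      have hstep := sieve_step N i hN h2 ?_ comp hinv
      · have := ih (pyIsqrt N + 1 - (i + 1)).toNat (by omega) (i + 1) rfl (by omega) _ hstep
        rw [max_eq_right (by omega)] at this ⊢
        exact this
      · have hle : i ≤ pyIsqrt N := by omega
        have h0 := pyIsqrt_nonneg N
        have := pyIsqrt_sq_le N hN
        nlinarith
    · rw [PySem.List.pyRange_one_eq_nil (by omega), List.foldl_nil, max_eq_left (by omega)]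
      exact hinv

theorem sieve_correct (N : Int) (hN : 0 ≤ N) (j : Nat) (h2 : 2 ≤ j) (hj : j ≤ N.toNat) :
    ((sieveComp N).getD j 0 = 0 ↔ j.Prime) := by
  unfold sieveComp
  have hinit : SInv N 2 (Array.replicate (N + 1).toNat 0) := by
    refine ⟨Array.size_replicate, fun k hk => ⟨?_, ?_⟩⟩
    · rintro ⟨p, hp, hlt, _, _⟩
      have := hp.two_le
      omega
    · intro _
      rw [getD_replicate, if_pos (by omega)]
  have hfin := sieve_loop N hN (pyIsqrt N + 1 - 2).toNat 2 rfl (by omega) _ hinit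
  obtain ⟨hsize, hchar⟩ := hfin
  have hc := hchar j hj
  have hmax : pyIsqrt N + 1 ≤ max 2 (pyIsqrt N + 1) := le_max_right _ _
  constructor
  · intro h0
    by_contra hnp
    -- j composite ⇒ marked ⇒ getD = 1, contradiction
    have hmk : SMarked (max 2 (pyIsqrt N + 1)) j := by
      have h1 : j ≠ 1 := by omega
      have hq := Nat.minFac_prime h1
      have hqd := Nat.minFac_dvd j
      have hqsq : j.minFac ^ 2 ≤ j := Nat.minFac_sq_le_self (by omega) hnp
      have hqsq' : j.minFac * j.minFac ≤ j := by nlinarith [sq_nonneg j.minFac]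
      have hsqrt : j.minFac ≤ Nat.sqrt N.toNat :=
        Nat.le_sqrt.mpr (le_trans hqsq' hj)
      refine ⟨j.minFac, hq, ?_, hqd, hqsq'⟩
      have : (j.minFac : Int) ≤ pyIsqrt N := by
        unfold pyIsqrt; exact_mod_cast hsqrt
      exact lt_of_lt_of_le (by omega) hmax
    rw [hc.1 hmk] at h0
    omega
  · intro hp
    refine hc.2 ?_
    rintro ⟨p, hpp, hlt, hdvd, hsq⟩
    rcases Nat.Prime.eq_one_or_self_of_dvd hp p hdvd with rfl | rfl
    · exact hpp.one_lt.ne' rfl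
    · nlinarith

-- ----- the while-loop computes the p-adic valuation -----

theorem valLoopE_spec (p v : Int) (hp : 2 ≤ p) (hppr : p.toNat.Prime) (hv : 0 < v) (e : Int) :
    valLoopE p v e = e + (padicValNat p.toNat v.toNat : Int) := by
  haveI : Fact p.toNat.Prime := ⟨hppr⟩
  have main : ∀ n : Nat, ∀ v : Int, v.toNat = n → 0 < v → ∀ e : Int,
      valLoopE p v e = e + (padicValNat p.toNat v.toNat : Int) := by
    intro n
    induction n using Nat.strong_induction_on with
    | _ n ih =>
      intro v hvn hv e
      rw [valLoopE]
      split_ifs with h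
      · obtain ⟨hp2, hv2, hm⟩ := h
        have hd : p ∣ v := (PySem.Int.mod_eq_zero_iff_dvd v p).mp hm
        have hpn : (p.toNat : Int) = p := Int.toNat_of_nonneg (by omega)
        have hvn' : (v.toNat : Int) = v := Int.toNat_of_nonneg (by omega)
        have hdn : p.toNat ∣ v.toNat := by
          rw [← Int.natCast_dvd_natCast, hpn, hvn']; exact hd
        have hfd : PySem.Int.floordiv v p = ((v.toNat / p.toNat : Nat) : Int) := by
          rw [PySem.Int.floordiv_eq_ediv_of_pos (by omega), ← hpn, ← hvn']
          exact (Int.natCast_ediv v.toNat p.toNat).symm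
        have hple : p.toNat ≤ v.toNat := Nat.le_of_dvd (by omega) hdn
        have hq0 : 0 < v.toNat / p.toNat := Nat.div_pos hple (by omega)
        have hqlt : v.toNat / p.toNat < v.toNat := Nat.div_lt_self (by omega) (by omega)
        rw [hfd]
        rw [ih (v.toNat / p.toNat) (by omega) _ (Int.toNat_natCast _) (by exact_mod_cast hq0)]
        have hval : padicValNat p.toNat (v.toNat / p.toNat) = padicValNat p.toNat v.toNat - 1 :=
          padicValNat.div hdn
        have hge : 1 ≤ padicValNat p.toNat v.toNat :=
          one_le_padicValNat_of_dvd (by omega) hdn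
        simp only [Int.toNat_natCast, hval]
        have : ((padicValNat p.toNat v.toNat - 1 : Nat) : Int)
            = (padicValNat p.toNat v.toNat : Int) - 1 := by omega
        rw [this]; ring
      · have hnd : ¬ p ∣ v := by
          intro hd
          exact h ⟨hp, hv, (PySem.Int.mod_eq_zero_iff_dvd v p).mpr hd⟩
        have hpn : (p.toNat : Int) = p := Int.toNat_of_nonneg (by omega)
        have hvn' : (v.toNat : Int) = v := Int.toNat_of_nonneg (by omega)
        have hdn : ¬ p.toNat ∣ v.toNat := by
          rw [← Int.natCast_dvd_natCast, hpn, hvn']; exact hnd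
        rw [padicValNat.eq_zero_of_not_dvd hdn]
        simp
  exact main v.toNat v rfl hv e

-- ----- bad-array characterization -----

set_option maxHeartbeats 2000000 in
theorem badArr_getD (N : Int) (hN : 0 ≤ N) (n : Nat) (hn : n ≤ N.toNat) :
    ((badArr N).getD n 0 = 0 ↔ ∀ q : Nat, q.Prime → q % 4 = 3 → Even (padicValNat q n)) := by
  have hinner : ∀ (p : Int) (arr : Array Int) (k : Nat) (d : Int),
      ((∃ m ∈ PySem.List.pyRange p (N + 1) p,
          (PySem.Int.mod (valLoopE p m 0) 2 = 1 ∧ m.toNat = k)) ∧ k < arr.size →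
        ((PySem.List.pyRange p (N + 1) p).foldl
          (fun b m => if PySem.Int.mod (valLoopE p m 0) 2 = 1 then b.setIfInBounds m.toNat 1 else b)
          arr).getD k d = 1) ∧
      (¬ ((∃ m ∈ PySem.List.pyRange p (N + 1) p,
          (PySem.Int.mod (valLoopE p m 0) 2 = 1 ∧ m.toNat = k)) ∧ k < arr.size) →
        ((PySem.List.pyRange p (N + 1) p).foldl
          (fun b m => if PySem.Int.mod (valLoopE p m 0) 2 = 1 then b.setIfInBounds m.toNat 1 else b)
          arr).getD k d = arr.getD k d) := by
    intro p arr k d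
    refine getD_foldl_mark _ _ (fun m k => PySem.Int.mod (valLoopE p m 0) 2 = 1 ∧ m.toNat = k)
      (fun c m => by split_ifs; exacts [Array.size_setIfInBounds, rfl])
      (fun c m k d h => by rw [if_pos h.1.1, getD_setIfInBounds, if_pos ⟨h.1.2, h.2⟩])
      (fun c m k d h => by
        split_ifs with hc
        · rw [getD_setIfInBounds, if_neg (fun hh => h ⟨⟨hc, hh.1⟩, hh.2⟩)]
        · rfl)
      arr k d
  have houter := getD_foldl_mark (PySem.List.pyRange 3 (N + 1) 4)
    (fun bad p =>
      if (sieveComp N).getD p.toNat 0 = 0 then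
        (PySem.List.pyRange p (N + 1) p).foldl
          (fun b m => if PySem.Int.mod (valLoopE p m 0) 2 = 1 then b.setIfInBounds m.toNat 1 else b)
          bad
      else bad)
    (fun p k => (sieveComp N).getD p.toNat 0 = 0 ∧
      ∃ m ∈ PySem.List.pyRange p (N + 1) p,
        (PySem.Int.mod (valLoopE p m 0) 2 = 1 ∧ m.toNat = k))
    (fun arr p => by
      dsimp only
      split_ifs with h
      · exact size_foldl_mark _ _ (fun c m => by split_ifs; exacts [Array.size_setIfInBounds, rfl]) arr
      · rfl)
    (fun arr p k d h => by
      dsimp only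
      rw [if_pos h.1.1]
      exact (hinner p arr k d).1 ⟨h.1.2, h.2⟩)
    (fun arr p k d h => by
      dsimp only
      by_cases hg : (sieveComp N).getD p.toNat 0 = 0
      · rw [if_pos hg]
        exact (hinner p arr k d).2 (fun hh => h ⟨⟨hg, hh.1⟩, hh.2⟩)
      · rw [if_neg hg])
    (Array.replicate (N + 1).toNat 0) n 0
  have hnsz : n < (Array.replicate (N + 1).toNat (0 : Int)).size := by
    rw [Array.size_replicate]; omega
  -- the marked set is exactly the n with an odd exponent of some prime ≡ 3 (mod 4)
  have hGiff : (∃ p ∈ PySem.List.pyRange 3 (N + 1) 4,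
      ((sieveComp N).getD p.toNat 0 = 0 ∧
        ∃ m ∈ PySem.List.pyRange p (N + 1) p,
          (PySem.Int.mod (valLoopE p m 0) 2 = 1 ∧ m.toNat = n))) ↔
      (∃ q : Nat, q.Prime ∧ q % 4 = 3 ∧ Odd (padicValNat q n)) := by
    constructor
    · rintro ⟨p, hpmem, hg, m, hmmem, hpar, hmk⟩
      rw [PySem.List.mem_pyRange_iff_of_pos (by omega)] at hpmem
      obtain ⟨hp3, hpN, hp4⟩ := hpmem
      rw [PySem.List.mem_pyRange_iff_of_pos (by omega)] at hmmem
      obtain ⟨hm1, hm2, hm3⟩ := hmmem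
      have hpc : (p.toNat : Int) = p := Int.toNat_of_nonneg (by omega)
      have hppr : p.toNat.Prime := by
        rw [← sieve_correct N hN p.toNat (by omega) (by omega)]
        exact hg
      have hm0 : 0 < m := by omega
      rw [valLoopE_spec p m (by omega) hppr hm0 0, zero_add] at hpar
      rw [PySem.Int.mod_eq_emod_of_pos (by omega)] at hpar
      refine ⟨p.toNat, hppr, by omega, ?_⟩
      have hval : (padicValNat p.toNat m.toNat % 2 : Nat) = 1 := by
        have : ((padicValNat p.toNat m.toNat : Int)) % 2 = ((padicValNat p.toNat m.toNat % 2 : Nat) : Int) := by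
          push_cast
          omega
        rw [this] at hpar
        exact_mod_cast hpar
      rw [hmk] at hval
      exact Nat.odd_iff.mpr hval
    · rintro ⟨q, hq, hq4, hodd⟩
      have hqd : q ∣ n := by
        by_contra hnd
        rw [padicValNat.eq_zero_of_not_dvd hnd] at hodd
        exact (Nat.not_odd_iff_even.mpr (by exact ⟨0, rfl⟩)) hodd
      have hn0 : n ≠ 0 := by
        rintro rfl
        rw [padicValNat_zero_right] at hodd
        exact (Nat.not_odd_iff_even.mpr (by exact ⟨0, rfl⟩)) hodd
      have hqn : q ≤ n := Nat.le_of_dvd (by omega) hqd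
      have hq3 : 3 ≤ q := by
        rcases Nat.lt_or_ge q 3 with h | h
        · omega
        · exact h
      refine ⟨(q : Int), ?_, ?_, (n : Int), ?_, ?_, Int.toNat_natCast n⟩
      · rw [PySem.List.mem_pyRange_iff_of_pos (by omega)]
        exact ⟨by exact_mod_cast hq3, by omega, by omega⟩
      · rw [sieve_correct N hN ((q : Int)).toNat (by simp; omega) (by simp; omega)]
        simpa using hq
      · rw [PySem.List.mem_pyRange_iff_of_pos (by exact_mod_cast by omega : (0:Int) < (q : Int))]
        refine ⟨by exact_mod_cast hqn, by omega, ?_⟩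
        have : (q : Int) ∣ (n : Int) := by exact_mod_cast hqd
        exact dvd_sub this dvd_rfl
      · have hqpr : ((q : Int)).toNat.Prime := by simpa using hq
        rw [valLoopE_spec (q : Int) (n : Int) (by exact_mod_cast (by omega : 2 ≤ q) : (2:Int) ≤ (q:Int)) hqpr
          (by exact_mod_cast Nat.pos_of_ne_zero hn0) 0, zero_add]
        rw [PySem.Int.mod_eq_emod_of_pos (by omega)]
        simp only [Int.toNat_natCast]
        have hv1 : padicValNat q n % 2 = 1 := Nat.odd_iff.mp hodd
        have : ((padicValNat q n : Int)) % 2 = ((padicValNat q n % 2 : Nat) : Int) := by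
          push_cast; omega
        rw [this, hv1]
        rfl
  have hbeq : badArr N = (PySem.List.pyRange 3 (N + 1) 4).foldl
      (fun bad p =>
        if (sieveComp N).getD p.toNat 0 = 0 then
          (PySem.List.pyRange p (N + 1) p).foldl
            (fun b m => if PySem.Int.mod (valLoopE p m 0) 2 = 1 then b.setIfInBounds m.toNat 1 else b)
            bad
        else bad)
      (Array.replicate (N + 1).toNat 0) := by
    unfold badArr; rfl
  rw [hbeq]
  constructor
  · intro h0 q hq hq4
    by_contra hodd
    rw [Nat.not_even_iff_odd] at hodd
    rw [houter.1 ⟨hGiff.mpr ⟨q, hq, hq4, hodd⟩, hnsz⟩] at h0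
    exact one_ne_zero h0
  · intro hall
    have hno : ¬ ((∃ p ∈ PySem.List.pyRange 3 (N + 1) 4,
        ((sieveComp N).getD p.toNat 0 = 0 ∧
          ∃ m ∈ PySem.List.pyRange p (N + 1) p,
            (PySem.Int.mod (valLoopE p m 0) 2 = 1 ∧ m.toNat = n))) ∧
        n < (Array.replicate (N + 1).toNat (0 : Int)).size) := by
      rintro ⟨hG, _⟩
      obtain ⟨q, hq, hq4, hodd⟩ := hGiff.mp hG
      exact (Nat.not_odd_iff_even.mpr (hall q hq hq4)) hodd
    rw [houter.2 hno, getD_replicate, if_pos (by simpa using hnsz)]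

-- ----- Fermat's two-squares criterion, over all primes -----

theorem rep_iff_criterion (n : Nat) :
    (∃ x y : Nat, n = x ^ 2 + y ^ 2) ↔
      ∀ q : Nat, q.Prime → q % 4 = 3 → Even (padicValNat q n) := by
  rw [Nat.eq_sq_add_sq_iff]
  constructor
  · intro h q hq hq3
    by_cases hmem : q ∈ n.primeFactors
    · exact h q hmem hq3
    · rcases Nat.eq_zero_or_pos n with rfl | hn
      · rw [padicValNat_zero_right]; exact ⟨0, rfl⟩
      · have : ¬ q ∣ n := fun hdvd => hmem (Nat.mem_primeFactors.mpr ⟨hq, hdvd, by omega⟩)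
        rw [padicValNat.eq_zero_of_not_dvd this]
        exact ⟨0, rfl⟩
  · intro h q hmem hq3
    exact h q (Nat.prime_of_mem_primeFactors hmem) hq3

theorem repS2S_iff (x : Int) (hx : 0 ≤ x) :
    RepS2S x ↔ ∃ a b : Nat, x.toNat = a ^ 2 + b ^ 2 := by
  constructor
  · rintro ⟨a, b, ha0, hab, hsum⟩
    refine ⟨a.toNat, b.toNat, ?_⟩
    have h1 : (a.toNat : Int) = a := Int.toNat_of_nonneg ha0
    have h2 : (b.toNat : Int) = b := Int.toNat_of_nonneg (by omega)
    have : (x.toNat : Int) = (a.toNat : Int) ^ 2 + (b.toNat : Int) ^ 2 := by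
      rw [h1, h2, Int.toNat_of_nonneg hx, ← hsum]; ring
    exact_mod_cast this
  · rintro ⟨a, b, hsum⟩
    refine ⟨(min a b : Nat), (max a b : Nat), by positivity, by exact_mod_cast min_le_max, ?_⟩
    have : ((min a b : Nat) : Int) * ((min a b : Nat) : Int) + ((max a b : Nat) : Int) * ((max a b : Nat) : Int)
        = ((a ^ 2 + b ^ 2 : Nat) : Int) := by
      rcases le_total a b with h | h
      · rw [Nat.min_eq_left h, Nat.max_eq_right h]; push_cast; ring
      · rw [Nat.min_eq_right h, Nat.max_eq_left h]; push_cast; ring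
    rw [this, ← hsum, Int.toNat_of_nonneg hx]

-- ----- the counting loop -----

theorem count_foldl_eq (p : Int → Prop) [DecidablePred p] (l : List Int) (c : Int) :
    l.foldl (fun count n => if p n then count + 1 else count) c
      = c + ((l.filter (fun n => decide (p n))).length : Int) := by
  induction l generalizing c with
  | nil => simp
  | cons x t ih =>
    by_cases hx : p x
    · rw [List.foldl_cons, if_pos hx, ih, List.filter_cons_of_pos (by simpa using hx),
        List.length_cons]
      push_cast; ring
    · rw [List.foldl_cons, if_neg hx, ih, List.filter_cons_of_neg (by simpa using hx)]

-- ===== VERDICT (by name: the statement is the Claim_ definition above) =====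
theorem count_s2s_spec : Claim_equal_count_s2s := by
  intro N _ hN
  show ((s2sLoop N).size : Int) = count_s2s_alt N
  have halt : count_s2s_alt N = (PySem.List.pyRange 0 (N + 1) 1).foldl
      (fun count n => if (badArr N).getD n.toNat 0 = 0 then count + 1 else count) 0 := by
    unfold count_s2s_alt; rfl
  rw [halt, count_foldl_eq (fun n => (badArr N).getD n.toNat 0 = 0), zero_add]
  have hnodupB : ((PySem.List.pyRange 0 (N + 1) 1).filter
      (fun n => decide ((badArr N).getD n.toNat 0 = 0))).Nodup :=
    (PySem.List.nodup_pyRange_one 0 (N + 1)).filter _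
  have hnodupA := nodup_A_set N
  have hsetEq : ((PySem.List.pyRange 0 (N + 1) 1).filter
      (fun n => decide ((badArr N).getD n.toNat 0 = 0))).toFinset
      = (s2sLoop N).toList.toFinset := by
    apply Finset.ext
    intro x
    rw [List.mem_toFinset, List.mem_toFinset, List.mem_filter,
      PySem.List.mem_pyRange_one, Std.TreeSet.mem_toList, mem_A_set N hN]
    constructor
    · rintro ⟨⟨hx0, hxlt⟩, hbad⟩
      have hbad' : (badArr N).getD x.toNat 0 = 0 := by simpa using hbad
      refine ⟨hx0, by omega, ?_⟩
      rw [repS2S_iff x hx0, rep_iff_criterion, ← badArr_getD N hN x.toNat (by omega)]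
      exact hbad'
    · rintro ⟨hx0, hxle, hrep⟩
      refine ⟨⟨hx0, by omega⟩, ?_⟩
      rw [repS2S_iff x hx0, rep_iff_criterion, ← badArr_getD N hN x.toNat (by omega)] at hrep
      simpa using hrep
  have hcard : ((PySem.List.pyRange 0 (N + 1) 1).filter
      (fun n => decide ((badArr N).getD n.toNat 0 = 0))).length
      = (s2sLoop N).toList.length := by
    rw [← List.toFinset_card_of_nodup hnodupB, ← List.toFinset_card_of_nodup hnodupA, hsetEq]
  rw [hcard, Std.TreeSet.length_toList]
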